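-- pv_equiv track=rewrite | github.com/Laya-Myadam/Prism | backend/construction/dashboard_engine.py | extract_project_stats
-- ===== SOURCE A (Python) =====
-- def extract_project_stats(grouped_docs: dict) -> dict:
--     return {
--         "total_documents": sum(len(v) for v in grouped_docs.values()),
--         "contracts":        len(grouped_docs.get("Contract", [])),
--         "drawings":         len(grouped_docs.get("Drawings", [])),
--         "specs":            len(grouped_docs.get("Specifications", [])),
--         "daily_reports":    len(grouped_docs.get("Daily Reports", [])),
--         "rfis":             len(grouped_docs.get("RFIs", [])),
--         "change_orders":    len(grouped_docs.get("Change Orders", [])),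
--         "inspections":      len(grouped_docs.get("Inspection Reports", [])),
--         "submittals":       len(grouped_docs.get("Submittals", [])),
--         "meeting_minutes":  len(grouped_docs.get("Meeting Minutes", [])),
--         "schedules":        len(grouped_docs.get("Schedule", [])),
--     }
-- ===== SOURCE B (Python) =====
-- CATEGORY_TO_KEY = {
--     "Contract": "contracts",
--     "Drawings": "drawings",
--     "Specifications": "specs",
--     "Daily Reports": "daily_reports",
--     "RFIs": "rfis",
--     "Change Orders": "change_orders",
--     "Inspection Reports": "inspections",
--     "Submittals": "submittals",
--     "Meeting Minutes": "meeting_minutes",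
--     "Schedule": "schedules",
-- }
--
-- def extract_project_stats(grouped_docs: dict) -> dict:
--     result = {
--         "total_documents": 0,
--         "contracts": 0,
--         "drawings": 0,
--         "specs": 0,
--         "daily_reports": 0,
--         "rfis": 0,
--         "change_orders": 0,
--         "inspections": 0,
--         "submittals": 0,
--         "meeting_minutes": 0,
--         "schedules": 0,
--     }
--     for category, docs in grouped_docs.items():
--         result["total_documents"] += len(docs)
--         key = CATEGORY_TO_KEY.get(category)
--         if key is not None:
--             result[key] = len(docs)
--     return result
-- ===== Notes on version B (the rewrite author's own statement) =====
-- stated objective: alternative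
-- what changed: Replaces the eleven independent fixed-key .get lookups plus a separate sum over values by one input-driven pass over grouped_docs.items() that dispatches through a reverse CATEGORY_TO_KEY map into a pre-zeroed result dict.
import Mathlib
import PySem

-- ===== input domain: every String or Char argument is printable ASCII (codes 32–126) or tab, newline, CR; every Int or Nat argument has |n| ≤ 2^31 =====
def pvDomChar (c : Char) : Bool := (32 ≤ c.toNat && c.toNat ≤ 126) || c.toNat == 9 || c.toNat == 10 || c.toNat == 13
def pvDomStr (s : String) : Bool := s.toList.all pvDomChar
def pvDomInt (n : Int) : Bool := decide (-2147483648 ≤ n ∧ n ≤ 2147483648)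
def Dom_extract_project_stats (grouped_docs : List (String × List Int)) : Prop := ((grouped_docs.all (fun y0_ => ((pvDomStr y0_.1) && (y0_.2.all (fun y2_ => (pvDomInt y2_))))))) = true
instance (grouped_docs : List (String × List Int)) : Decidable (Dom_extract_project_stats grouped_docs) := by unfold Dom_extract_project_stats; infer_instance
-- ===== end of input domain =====

-- B replaces A's eleven fixed-key .get lookups plus a separate sum over values by one
-- input-driven pass over grouped_docs.items() dispatching through a reverse category→key map
-- into a pre-zeroed result dict (objective: alternative decomposition, same cost).

-- ===== PORT A =====
def extract_project_stats (grouped_docs : List (String × List Int)) : List (String × Int) :=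
  let d : PySem.Dict String (List Int) := PySem.Dict.mk grouped_docs
  [("total_documents", (d.values.map (fun v => (v.length : Int))).sum),
   ("contracts",       ((d.getD "Contract" []).length : Int)),
   ("drawings",        ((d.getD "Drawings" []).length : Int)),
   ("specs",           ((d.getD "Specifications" []).length : Int)),
   ("daily_reports",   ((d.getD "Daily Reports" []).length : Int)),
   ("rfis",            ((d.getD "RFIs" []).length : Int)),
   ("change_orders",   ((d.getD "Change Orders" []).length : Int)),
   ("inspections",     ((d.getD "Inspection Reports" []).length : Int)),
   ("submittals",      ((d.getD "Submittals" []).length : Int)),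
   ("meeting_minutes", ((d.getD "Meeting Minutes" []).length : Int)),
   ("schedules",       ((d.getD "Schedule" []).length : Int))]

-- ===== PORT B =====
def ctkList : List (String × String) :=
  [("Contract", "contracts"), ("Drawings", "drawings"), ("Specifications", "specs"),
   ("Daily Reports", "daily_reports"), ("RFIs", "rfis"), ("Change Orders", "change_orders"),
   ("Inspection Reports", "inspections"), ("Submittals", "submittals"),
   ("Meeting Minutes", "meeting_minutes"), ("Schedule", "schedules")]

def categoryToKey : PySem.Dict String String := PySem.Dict.mk ctkList

def initStats : PySem.Dict String Int :=
  PySem.Dict.mk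
    [("total_documents", 0), ("contracts", 0), ("drawings", 0), ("specs", 0),
     ("daily_reports", 0), ("rfis", 0), ("change_orders", 0), ("inspections", 0),
     ("submittals", 0), ("meeting_minutes", 0), ("schedules", 0)]

def stepStats (result : PySem.Dict String Int) (p : String × List Int) : PySem.Dict String Int :=
  let result := result.modify "total_documents" 0 (fun t => t + (p.2.length : Int))
  match categoryToKey.get? p.1 with
  | some key => result.insert key (p.2.length : Int)
  | none => result

def extract_project_stats_alt (grouped_docs : List (String × List Int)) : List (String × Int) :=
  (grouped_docs.foldl stepStats initStats).items

-- ===== PRECONDITION & SPEC =====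
-- The assoc-list argument represents a Python dict, whose keys are necessarily distinct;
-- Pre_ excludes duplicate-key lists, which correspond to no Python input of A.
def Pre_extract_project_stats (grouped_docs : List (String × List Int)) : Prop :=
  (grouped_docs.map Prod.fst).Nodup
instance (grouped_docs : List (String × List Int)) : Decidable (Pre_extract_project_stats grouped_docs) := by unfold Pre_extract_project_stats; infer_instance
def pvWitness_extract_project_stats : (List (String × List Int)) :=
  [("Contract", [1, 2]), ("Drawings", []), ("notes", [7])]

def Spec_extract_project_stats (grouped_docs : List (String × List Int)) (out : List (String × Int)) : Prop := out = extract_project_stats_alt grouped_docs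
instance (grouped_docs : List (String × List Int)) (out : List (String × Int)) : Decidable (Spec_extract_project_stats grouped_docs out) := by unfold Spec_extract_project_stats; infer_instance

-- ===== CLAIM (what is proved, stated in full; the proofs are below) =====
def Claim_equal_extract_project_stats : Prop := ∀ (grouped_docs : List (String × List Int)), Dom_extract_project_stats grouped_docs → Pre_extract_project_stats grouped_docs → Spec_extract_project_stats grouped_docs (extract_project_stats grouped_docs)

-- ===== LEMMAS AND PROOFS =====
def K11 : List String :=
  ["total_documents", "contracts", "drawings", "specs", "daily_reports", "rfis",
   "change_orders", "inspections", "submittals", "meeting_minutes", "schedules"]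

theorem pvWitness_ok : Dom_extract_project_stats pvWitness_extract_project_stats ∧
    Pre_extract_project_stats pvWitness_extract_project_stats := by decide

theorem ctk_inj : ∀ p ∈ ctkList, ∀ q ∈ ctkList, p.2 = q.2 → p.1 = q.1 := by decide

theorem ctk_val_ne_total : ∀ q ∈ ctkList, q.2 ≠ "total_documents" := by decide

theorem ctk_val_mem_K11 : ∀ q ∈ ctkList, q.2 ∈ K11 := by decide

theorem ctk_get?_mem {c k : String} (h : categoryToKey.get? c = some k) : (c, k) ∈ ctkList :=
  PySem.Dict.mem_items_of_get?_eq_some _ h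

theorem mem_of_get?_mk_some {g : List (String × List Int)} {x : String} {w : List Int}
    (h : (PySem.Dict.mk g).get? x = some w) : x ∈ g.map Prod.fst := by
  have := PySem.Dict.mem_keys_of_mem_items _ (PySem.Dict.mem_items_of_get?_eq_some _ h)
  simpa [PySem.Dict.keys_mk] using this

theorem keys_step (r : PySem.Dict String Int) (p : String × List Int)
    (h : r.keys = K11) : (stepStats r p).keys = K11 := by
  unfold stepStats
  have hcont : ∀ k ∈ K11, r.contains k = true := by
    intro k hk
    rw [PySem.Dict.contains_eq_decide_mem_keys, h]
    simpa using hk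
  have hmod : (r.modify "total_documents" 0 (fun t => t + (p.2.length : Int))).keys = K11 := by
    rw [PySem.Dict.keys_modify, PySem.Dict.keys_insert_of_contains _ _ (hcont _ (by decide)), h]
  cases hck : categoryToKey.get? p.1 with
  | none => simpa using hmod
  | some k =>
    have hkmem : k ∈ K11 := ctk_val_mem_K11 _ (ctk_get?_mem hck)
    have : (r.modify "total_documents" 0 (fun t => t + (p.2.length : Int))).contains k = true := by
      rw [PySem.Dict.contains_eq_decide_mem_keys, hmod]; simpa using hkmem
    rw [PySem.Dict.keys_insert_of_contains _ _ this, hmod]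

theorem keys_fold (g : List (String × List Int)) (r : PySem.Dict String Int)
    (h : r.keys = K11) : (g.foldl stepStats r).keys = K11 := by
  induction g generalizing r with
  | nil => simpa using h
  | cons p gs ih => exact ih _ (keys_step r p h)

theorem getD_step_total (r : PySem.Dict String Int) (p : String × List Int) :
    (stepStats r p).getD "total_documents" 0 = r.getD "total_documents" 0 + (p.2.length : Int) := by
  unfold stepStats
  cases hck : categoryToKey.get? p.1 with
  | none => simp [PySem.Dict.getD_modify_self]
  | some k =>
    have hne : ("total_documents" : String) ≠ k := by
      intro he; exact ctk_val_ne_total _ (ctk_get?_mem hck) he.symm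
    rw [PySem.Dict.getD_insert_of_ne _ _ _ hne, PySem.Dict.getD_modify_self]

theorem fold_total (g : List (String × List Int)) (r : PySem.Dict String Int) :
    (g.foldl stepStats r).getD "total_documents" 0 =
      r.getD "total_documents" 0 + (g.map (fun p => (p.2.length : Int))).sum := by
  induction g generalizing r with
  | nil => simp
  | cons p gs ih =>
    simp only [List.foldl_cons, List.map_cons, List.sum_cons, ih, getD_step_total]
    ring

theorem fold_slot (cat0 key0 : String) (hmem : (cat0, key0) ∈ ctkList)
    (g : List (String × List Int)) (hnd : (g.map Prod.fst).Nodup) (r : PySem.Dict String Int) :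
    (g.foldl stepStats r).getD key0 0 =
      ((PySem.Dict.mk g).get? cat0).elim (r.getD key0 0) (fun v => (v.length : Int)) := by
  induction g generalizing r with
  | nil => simp [PySem.Dict.get?]
  | cons p gs ih =>
    obtain ⟨cat, v⟩ := p
    simp only [List.map_cons, List.nodup_cons] at hnd
    obtain ⟨hnotin, hndtl⟩ := hnd
    have hck : categoryToKey.keys.Nodup := by decide
    rw [List.foldl_cons, ih hndtl, PySem.Dict.get?_mk_cons]
    by_cases hc : cat = cat0
    · subst hc
      have hgs : (PySem.Dict.mk gs).get? cat = none := by
        cases hx : (PySem.Dict.mk gs).get? cat with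
        | none => rfl
        | some w => exact absurd (mem_of_get?_mk_some hx) hnotin
      have hget : categoryToKey.get? cat = some key0 :=
        (PySem.Dict.get?_eq_some_iff_mem_items _ _ _ hck).2 hmem
      unfold stepStats
      simp [hgs, hget, PySem.Dict.getD_insert_self]
    · have hbe : (cat == cat0) = false := by simpa using hc
      rw [hbe, if_neg (by simp)]
      cases hx : (PySem.Dict.mk gs).get? cat0 with
      | some w => simp [Option.elim]
      | none =>
        simp only [Option.elim]
        unfold stepStats
        have h1 : ∀ (d : PySem.Dict String Int),
            (d.modify "total_documents" 0 (fun t => t + (v.length : Int))).getD key0 0 = d.getD key0 0 := by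
          intro d
          rw [PySem.Dict.getD_modify]
          rw [if_neg (by intro he; exact ctk_val_ne_total _ hmem he)]
        cases hck2 : categoryToKey.get? cat with
        | none => simp [h1]
        | some k =>
          have hkne : key0 ≠ k := by
            intro he; subst he
            exact hc (ctk_inj _ (ctk_get?_mem hck2) _ hmem rfl)
          rw [PySem.Dict.getD_insert_of_ne _ _ _ hkne, h1]

theorem getD_bridge (d : PySem.Dict String (List Int)) (cat0 : String) :
    (d.get? cat0).elim (0 : Int) (fun v => (v.length : Int)) = ((d.getD cat0 []).length : Int) := by
  rw [PySem.Dict.getD_eq_get?_getD]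
  cases d.get? cat0 <;> simp

theorem slot_final (cat0 key0 : String) (hmem : (cat0, key0) ∈ ctkList)
    (hz : initStats.getD key0 0 = 0)
    (g : List (String × List Int)) (hnd : (g.map Prod.fst).Nodup) :
    (g.foldl stepStats initStats).getD key0 0 = (((PySem.Dict.mk g).getD cat0 []).length : Int) := by
  rw [fold_slot cat0 key0 hmem g hnd, hz, getD_bridge]

-- ===== VERDICT (by name: the statement is the Claim_ definition above) =====
theorem extract_project_stats_spec : Claim_equal_extract_project_stats := by
  intro g _ hpre
  unfold Spec_extract_project_stats extract_project_stats_alt extract_project_stats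
  have hk : (g.foldl stepStats initStats).keys = K11 := keys_fold g initStats (by decide)
  rw [PySem.Dict.items_eq_map_keys _ (by rw [hk]; decide) 0, hk]
  have htot : (g.foldl stepStats initStats).getD "total_documents" 0 =
      ((PySem.Dict.mk g).values.map (fun v => (v.length : Int))).sum := by
    have h0 : initStats.getD "total_documents" 0 = 0 := by decide
    rw [fold_total g initStats, h0]
    simp [PySem.Dict.values, List.map_map, Function.comp_def]
  simp only [K11, List.map_cons, List.map_nil, htot,
    slot_final "Contract" "contracts" (by decide) (by decide) g hpre,
    slot_final "Drawings" "drawings" (by decide) (by decide) g hpre,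
    slot_final "Specifications" "specs" (by decide) (by decide) g hpre,
    slot_final "Daily Reports" "daily_reports" (by decide) (by decide) g hpre,
    slot_final "RFIs" "rfis" (by decide) (by decide) g hpre,
    slot_final "Change Orders" "change_orders" (by decide) (by decide) g hpre,
    slot_final "Inspection Reports" "inspections" (by decide) (by decide) g hpre,
    slot_final "Submittals" "submittals" (by decide) (by decide) g hpre,
    slot_final "Meeting Minutes" "meeting_minutes" (by decide) (by decide) g hpre,
    slot_final "Schedule" "schedules" (by decide) (by decide) g hpre]
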